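-- pv_equiv track=rewrite | github.com/V0NOG/Torrent-Api-py | main.py | _guess_music_kind
-- ===== SOURCE A (Python) =====
-- from typing import Dict, Any, List, Optional, Tuple
--
-- _ALLOWED_AUDIO_EXT = {".mp3", ".flac", ".m4a", ".m4b", ".aac", ".ogg", ".opus", ".wav"}
--
-- def _guess_music_kind(files: List[Dict[str, Any]]) -> str:
--     audio = [f for f in files if (f.get("ext") or "").lower() in _ALLOWED_AUDIO_EXT]
--     if any((f.get("ext") or "").lower() == ".m4b" for f in audio):
--         return "audiobook"
--
--     huge = 0
--     for f in audio:
--         try: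
--             if int(f.get("size") or 0) >= 250 * 1024 * 1024:
--                 huge += 1
--         except Exception:
--             pass
--     if huge >= 1 and len(audio) <= 3:
--         return "audiobook"
--
--     hints = ("audiobook", "audible", "aax", "m4b")
--     for f in audio:
--         rel = (f.get("rel") or "").lower()
--         if any(h in rel for h in hints):
--             return "audiobook"
--
--     return "music"
-- ===== SOURCE B (Python) =====
-- _ALLOWED_AUDIO_EXT = {".mp3", ".flac", ".m4a", ".m4b", ".aac", ".ogg", ".opus", ".wav"}
--
-- def _guess_music_kind(files):
--     audio_count = 0
--     has_m4b = False
--     has_huge = False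
--     has_hint = False
--     for f in files:
--         ext = (f.get("ext") or "").lower()
--         if ext not in _ALLOWED_AUDIO_EXT:
--             continue
--         audio_count += 1
--         if ext == ".m4b":
--             has_m4b = True
--         try:
--             if int(f.get("size") or 0) >= 262144000:
--                 has_huge = True
--         except Exception:
--             pass
--         rel = (f.get("rel") or "").lower()
--         if any(h in rel for h in ("audiobook", "audible", "aax", "m4b")):
--             has_hint = True
--     if has_m4b or (has_huge and audio_count <= 3) or has_hint:
--         return "audiobook"
--     return "music"
-- ===== Notes on version B (the rewrite author's own statement) =====
-- stated objective: alternative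
-- what changed: Replaced the filtered-list build plus three separate early-return scans (m4b any-scan, huge-count loop, hint loop) with one accumulating pass over files that tracks audio count, has_m4b, has_huge and has_hint, deciding with a single combined boolean at the end.
import Mathlib
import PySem

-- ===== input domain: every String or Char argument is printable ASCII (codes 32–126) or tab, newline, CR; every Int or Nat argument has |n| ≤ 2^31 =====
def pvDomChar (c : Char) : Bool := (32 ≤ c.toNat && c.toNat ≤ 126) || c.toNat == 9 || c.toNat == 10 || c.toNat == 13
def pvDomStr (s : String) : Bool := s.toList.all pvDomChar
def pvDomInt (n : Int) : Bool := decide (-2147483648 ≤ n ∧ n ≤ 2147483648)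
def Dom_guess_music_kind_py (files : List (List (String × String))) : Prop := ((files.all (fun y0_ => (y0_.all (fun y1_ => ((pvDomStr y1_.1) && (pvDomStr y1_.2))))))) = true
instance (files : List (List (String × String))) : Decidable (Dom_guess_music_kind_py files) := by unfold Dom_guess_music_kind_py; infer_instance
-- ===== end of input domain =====

-- B replaces A's filtered list plus three separate early-return scans by ONE accumulating
-- pass over `files` and a single combined boolean decision (objective: alternative; same O(n) cost).

-- ===== PORT A =====
-- _ALLOWED_AUDIO_EXT (a Python set literal)
def pvAllowedA : PySem.Set String :=
  PySem.Set.ofList [".mp3", ".flac", ".m4a", ".m4b", ".aac", ".ogg", ".opus", ".wav"]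

-- (f.get(k) or "") : dict lookup = first match on the association list; None and "" both give ""
def pvGetA (f : List (String × String)) (k : String) : String :=
  (PySem.Dict.mk f).getD k ""

-- int(f.get("size") or 0): empty/missing value is the int literal 0, otherwise int(str); none = ValueError (caught by A)
def pvSizeA (f : List (String × String)) : Option Int :=
  let v := pvGetA f "size"
  if v = "" then some 0 else PySem.Int.ofStr? v

-- A's third loop: early return "audiobook" on the first hint match
def pvHintScanA : List (List (String × String)) → String
  | [] => "music"
  | f :: rest =>
    let rel := PySem.Str.lower (pvGetA f "rel")
    if ["audiobook", "audible", "aax", "m4b"].any (fun h => PySem.Str.isIn h rel)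
    then "audiobook" else pvHintScanA rest

def guess_music_kind_py (files : List (List (String × String))) : String :=
  let audio := files.filter (fun f => pvAllowedA.contains (PySem.Str.lower (pvGetA f "ext")))
  if audio.any (fun f => PySem.Str.lower (pvGetA f "ext") == ".m4b") then "audiobook"
  else
    let huge : Int := audio.foldl (fun h f =>
      match pvSizeA f with
      | some n => if n ≥ 250 * 1024 * 1024 then h + 1 else h
      | none => h) 0
    if huge ≥ 1 ∧ audio.length ≤ 3 then "audiobook"
    else pvHintScanA audio

-- ===== PORT B =====
def pvAllowedB : PySem.Set String :=
  PySem.Set.ofList [".mp3", ".flac", ".m4a", ".m4b", ".aac", ".ogg", ".opus", ".wav"]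

def pvGetB (f : List (String × String)) (k : String) : String :=
  (PySem.Dict.mk f).getD k ""

-- one loop step: skip non-audio, else update (audio_count, has_m4b, has_huge, has_hint)
def pvStepB (st : Int × Bool × Bool × Bool) (f : List (String × String)) :
    Int × Bool × Bool × Bool :=
  let ext := PySem.Str.lower (pvGetB f "ext")
  if ¬ pvAllowedB.contains ext then st
  else
    let c := st.1 + 1
    let m := st.2.1 || (ext == ".m4b")
    let hu := st.2.2.1 ||
      (match (let v := pvGetB f "size"; if v = "" then some 0 else PySem.Int.ofStr? v) with
       | some n => decide (n ≥ 262144000)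
       | none => false)
    let rel := PySem.Str.lower (pvGetB f "rel")
    let hi := st.2.2.2 || ["audiobook", "audible", "aax", "m4b"].any (fun h => PySem.Str.isIn h rel)
    (c, m, hu, hi)

def guess_music_kind_py_alt (files : List (List (String × String))) : String :=
  let st := files.foldl pvStepB (0, false, false, false)
  if st.2.1 || (st.2.2.1 && decide (st.1 ≤ 3)) || st.2.2.2 then "audiobook" else "music"

-- ===== PRECONDITION & SPEC =====
def Spec_guess_music_kind_py (files : List (List (String × String))) (out : String) : Prop := out = guess_music_kind_py_alt files
instance (files : List (List (String × String))) (out : String) : Decidable (Spec_guess_music_kind_py files out) := by unfold Spec_guess_music_kind_py; infer_instance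

-- ===== CLAIM (what is proved, stated in full; the proofs are below) =====
def Claim_equal_guess_music_kind_py : Prop := ∀ (files : List (List (String × String))), Dom_guess_music_kind_py files → Spec_guess_music_kind_py files (guess_music_kind_py files)

-- ===== LEMMAS AND PROOFS =====

-- the three per-file predicates, written over A's helpers
def pvIsAudio (f : List (String × String)) : Bool :=
  pvAllowedA.contains (PySem.Str.lower (pvGetA f "ext"))
def pvIsM4b (f : List (String × String)) : Bool :=
  PySem.Str.lower (pvGetA f "ext") == ".m4b"
def pvIsHuge (f : List (String × String)) : Bool :=
  match pvSizeA f with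
  | some n => decide (n ≥ 262144000)
  | none => false
def pvHasHint (f : List (String × String)) : Bool :=
  ["audiobook", "audible", "aax", "m4b"].any (fun h => PySem.Str.isIn h (PySem.Str.lower (pvGetA f "rel")))

-- B's fold computes (count, any-m4b, any-huge, any-hint) over the audio sublist
theorem pvStepB_char (files : List (List (String × String))) (c : Int) (m hu hi : Bool) :
    files.foldl pvStepB (c, m, hu, hi) =
      (c + (files.filter pvIsAudio).length,
       m || (files.filter pvIsAudio).any pvIsM4b,
       hu || (files.filter pvIsAudio).any pvIsHuge,
       hi || (files.filter pvIsAudio).any pvHasHint) := by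
  induction files generalizing c m hu hi with
  | nil => simp
  | cons f rest ih =>
    by_cases ha : pvIsAudio f = true
    · have hext : pvAllowedB.contains (PySem.Str.lower (pvGetB f "ext")) = true := ha
      have hstep : pvStepB (c, m, hu, hi) f =
          (c + 1, m || pvIsM4b f, hu || pvIsHuge f, hi || pvHasHint f) := by
        simp only [pvStepB]
        rw [if_neg (not_not_intro hext)]
        simp only [pvIsM4b, pvIsHuge, pvHasHint, pvSizeA, pvGetA, pvGetB]
      simp only [List.foldl_cons, hstep, ih, List.filter_cons, ha, if_true,
        List.length_cons, List.any_cons]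
      refine Prod.ext ?_ (Prod.ext ?_ (Prod.ext ?_ ?_))
      · push_cast; ring
      · simp [Bool.or_assoc]
      · simp [Bool.or_assoc]
      · simp [Bool.or_assoc]
    · have hext : ¬ pvAllowedB.contains (PySem.Str.lower (pvGetB f "ext")) = true := ha
      have hstep : pvStepB (c, m, hu, hi) f = (c, m, hu, hi) := by
        simp only [pvStepB]
        rw [if_pos hext]
      simp only [List.foldl_cons, hstep, ih, List.filter_cons]
      simp [ha]

-- A's huge-counting fold, characterised as a countP
theorem pvHugeFold_char (audio : List (List (String × String))) (k : Int) :
    audio.foldl (fun h f =>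
      match pvSizeA f with
      | some n => if n ≥ 250 * 1024 * 1024 then h + 1 else h
      | none => h) k = k + (audio.countP pvIsHuge : Int) := by
  induction audio generalizing k with
  | nil => simp
  | cons f rest ih =>
    simp only [List.foldl_cons, List.countP_cons, ih]
    unfold pvIsHuge
    cases h : pvSizeA f with
    | none => simp
    | some n =>
      by_cases hn : n ≥ 262144000
      · simp [hn]; ring
      · simp [hn]

-- A's early-return hint loop, characterised as an any
theorem pvHintScanA_char (audio : List (List (String × String))) :
    pvHintScanA audio = if audio.any pvHasHint then "audiobook" else "music" := by
  induction audio with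
  | nil => simp [pvHintScanA]
  | cons f rest ih =>
    simp only [pvHintScanA]
    have hfold : (["audiobook", "audible", "aax", "m4b"].any
        (fun h => PySem.Str.isIn h (PySem.Str.lower (pvGetA f "rel")))) = pvHasHint f := rfl
    rw [hfold]
    cases h : pvHasHint f with
    | true => simp [List.any_cons, h]
    | false => simp [List.any_cons, h, ih]

-- ===== VERDICT (by name: the statement is the Claim_ definition above) =====
theorem guess_music_kind_py_spec : Claim_equal_guess_music_kind_py := by
  intro files _
  show guess_music_kind_py files = guess_music_kind_py_alt files
  simp only [guess_music_kind_py, guess_music_kind_py_alt]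
  rw [pvStepB_char, pvHugeFold_char, pvHintScanA_char]
  have hfold : (fun f => pvAllowedA.contains (PySem.Str.lower (pvGetA f "ext"))) = pvIsAudio := rfl
  have hm4b : (fun f => PySem.Str.lower (pvGetA f "ext") == ".m4b") = pvIsM4b := rfl
  rw [hfold, hm4b]
  simp only [zero_add]
  set audio := files.filter pvIsAudio with haudio
  by_cases hm : audio.any pvIsM4b = true
  · simp [hm]
  · simp only [Bool.not_eq_true] at hm
    by_cases hh : audio.any pvIsHuge = true
    · obtain ⟨a, ha, hpa⟩ := List.any_eq_true.mp hh
      have hc1 : (1 : Int) ≤ (audio.countP pvIsHuge : Int) := by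
        have : 0 < audio.countP pvIsHuge := List.countP_pos_iff.mpr ⟨a, ha, hpa⟩
        omega
      by_cases hl : audio.length ≤ 3
      · have hli : (audio.length : Int) ≤ 3 := by exact_mod_cast hl
        simp [hm, hh, hc1, hl, hli]
      · have hli : ¬ (audio.length : Int) ≤ 3 := by exact_mod_cast hl
        simp [hm, hh, hl, hli]
    · simp only [Bool.not_eq_true] at hh
      have hc0 : audio.countP pvIsHuge = 0 := by
        by_contra h0
        obtain ⟨a, ha, hpa⟩ := List.countP_pos_iff.mp (Nat.pos_of_ne_zero h0)
        have := List.any_eq_true.mpr ⟨a, ha, hpa⟩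
        simp [hh] at this
      simp [hm, hh, hc0]
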